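-- pv_equiv track=rewrite | github.com/sh1rokovs/Bioinformatics_programs | new/task_5.py | def_score
-- ===== SOURCE A (Python) =====
-- import collections
--
-- def def_score(def_motifs):
--     score = 0
--     cons_k_mer = "".join([collections.Counter([def_motifs[el][elem]
--                                                for el in range(len(def_motifs))]).most_common(1)[0][0]
--                           for elem in range(len(def_motifs[0]))])
--     for el in range(len(def_motifs)):
--         for elem in range(len(def_motifs[0])):
--             if def_motifs[el][elem] != cons_k_mer[elem]:
--                 score += 1
--     return score
-- ===== SOURCE B (Python) =====
-- def def_score(def_motifs):
--     n = len(def_motifs)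
--     score = 0
--     for j in range(len(def_motifs[0])):
--         counts = {}
--         for row in def_motifs:
--             c = row[j]
--             counts[c] = counts.get(c, 0) + 1
--         score += n - max(counts.values())
--     return score
-- ===== Notes on version B (the rewrite author's own statement) =====
-- stated objective: simpler
-- what changed: B never builds the consensus string: a single pass over columns adds n minus the column's maximum character count, instead of A's two passes (consensus via Counter.most_common per column, then a full nested re-scan counting mismatches).
import Mathlib
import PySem

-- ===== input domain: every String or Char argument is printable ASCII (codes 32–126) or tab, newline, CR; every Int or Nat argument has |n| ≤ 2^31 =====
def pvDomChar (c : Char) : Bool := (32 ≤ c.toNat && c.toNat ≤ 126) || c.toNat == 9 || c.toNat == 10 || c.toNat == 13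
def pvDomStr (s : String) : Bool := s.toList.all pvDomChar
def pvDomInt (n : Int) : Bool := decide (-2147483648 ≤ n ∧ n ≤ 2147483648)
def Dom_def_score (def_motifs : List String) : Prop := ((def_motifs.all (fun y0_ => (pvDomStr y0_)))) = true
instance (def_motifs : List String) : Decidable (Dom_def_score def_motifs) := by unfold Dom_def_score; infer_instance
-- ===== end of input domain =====

-- B replaces A's two passes (build the consensus string, then re-scan the whole matrix) by one
-- pass over columns adding n - (max column count); objective: simpler (measured faster in a timing run).

-- shared indexing helper: row[j] (Pre_ rules out the out-of-range case, where Python raises)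
def pvCharAt (s : String) (i : Int) : Char := (PySem.Str.pyGet? s i).getD ' '

-- ===== PORT A =====
def def_score (def_motifs : List String) : Int :=
  let cons : List Char :=
    (PySem.List.pyRange 0 (PySem.Str.len (PySem.List.pyGetD def_motifs 0 "")) 1).map
      (fun elem =>
        ((PySem.List.sorted
            (PySem.Dict.counter
               ((PySem.List.pyRange 0 (def_motifs.length) 1).map
                 (fun el => pvCharAt (PySem.List.pyGetD def_motifs el "") elem))).items
            (fun p => p.2) true).headD (' ', 0)).1)
  (PySem.List.pyRange 0 (def_motifs.length) 1).foldl (fun score el =>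
    (PySem.List.pyRange 0 (PySem.Str.len (PySem.List.pyGetD def_motifs 0 "")) 1).foldl
      (fun score elem =>
        if pvCharAt (PySem.List.pyGetD def_motifs el "") elem ≠ PySem.List.pyGetD cons elem ' '
        then score + 1 else score) score) 0

-- ===== PORT B =====
def def_score_alt (def_motifs : List String) : Int :=
  let n : Int := def_motifs.length
  (PySem.List.pyRange 0 (PySem.Str.len (PySem.List.pyGetD def_motifs 0 "")) 1).foldl
    (fun score j =>
      let counts := def_motifs.foldl
        (fun d row => d.insert (pvCharAt row j) (d.getD (pvCharAt row j) 0 + 1))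
        PySem.Dict.empty
      score + (n - (PySem.List.max? counts.values (fun x => x)).getD 0)) 0

-- ===== PRECONDITION & SPEC =====
-- Pre_ excludes exactly the inputs where A raises IndexError: the empty matrix (def_motifs[0])
-- and matrices with a row shorter than row 0 (def_motifs[el][elem]).
def Pre_def_score (def_motifs : List String) : Prop :=
  def_motifs ≠ [] ∧ ∀ s ∈ def_motifs, PySem.Str.len (def_motifs.headD "") ≤ PySem.Str.len s
instance (def_motifs : List String) : Decidable (Pre_def_score def_motifs) := by
  unfold Pre_def_score; infer_instance
def pvWitness_def_score : List String := ["ACGT", "AGGT", "ACCT"]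

def Spec_def_score (def_motifs : List String) (out : Int) : Prop := out = def_score_alt def_motifs
instance (def_motifs : List String) (out : Int) : Decidable (Spec_def_score def_motifs out) := by unfold Spec_def_score; infer_instance

-- ===== CLAIM (what is proved, stated in full; the proofs are below) =====
def Claim_equal_def_score : Prop := ∀ (def_motifs : List String), Dom_def_score def_motifs → Pre_def_score def_motifs → Spec_def_score def_motifs (def_score def_motifs)

-- ===== LEMMAS AND PROOFS =====

-- the column j of the matrix, as both ports read it
def pvCol (ms : List String) (j : Int) : List Char := ms.map (fun s => pvCharAt s j)

-- A's per-column consensus character (head of the count-descending sort of the Counter items)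
def pvConsChar (xs : List Char) : Char :=
  ((PySem.List.sorted (PySem.Dict.counter xs).items (fun p => p.2) true).headD (' ', 0)).1

theorem pv_range_getD {α : Type} (xs : List α) (d : α) :
    (List.range xs.length).map (fun i => xs.getD i d) = xs := by
  have h := PySem.List.map_pyGetD_pyRange_zero xs d
  rw [PySem.List.len_eq, PySem.List.pyRange_zero_natCast, List.map_map] at h
  simp only [Function.comp_def, PySem.List.pyGetD_natCast] at h
  exact h

theorem pv_listsum_range (n : Nat) (f : Nat → Int) :
    ((List.range n).map f).sum = ∑ i ∈ Finset.range n, f i := by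
  rw [← List.sum_toFinset]
  · simp [List.toFinset_range]
  · exact List.nodup_range

theorem pv_sum_swap (n k : Nat) (g : Nat → Nat → Int) :
    ((List.range n).map (fun i => ((List.range k).map (fun j => g i j)).sum)).sum
      = ((List.range k).map (fun j => ((List.range n).map (fun i => g i j)).sum)).sum := by
  simp only [pv_listsum_range]
  exact Finset.sum_comm

theorem pv_mismatch_sum (xs : List Char) (c : Char) :
    (xs.map (fun x => if x ≠ c then (1:Int) else 0)).sum
      = (xs.length : Int) - (xs.count c : Int) := by
  simp only [ne_eq, ite_not]
  induction xs with
  | nil => simp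
  | cons a t ih =>
      by_cases h : a = c
      · simp [h, ih]
      · simp only [List.map_cons, List.sum_cons, if_neg h, List.count_cons, List.length_cons, ih]
        have hb : (a == c) = false := by simp [h]
        simp [hb]; omega

-- the Counter's maximum value is the count of A's consensus character
theorem pv_maxVal (xs : List Char) (hxs : xs ≠ []) :
    (PySem.List.max? (PySem.Dict.counter xs).values (fun x => x)).getD 0
      = (xs.count (pvConsChar xs) : Int) := by
  have hitems : (PySem.Dict.counter xs).items
      = (PySem.Set.ofList xs).map (fun c => (c, (xs.count c : Int))) :=
    PySem.Dict.items_counter xs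
  have hsetne : PySem.Set.ofList xs ≠ [] := by
    cases xs with
    | nil => exact absurd rfl hxs
    | cons a t =>
        intro h
        have : a ∈ PySem.Set.ofList (a :: t) := by
          rw [PySem.Set.mem_ofList]; exact List.mem_cons_self
        simp [h] at this
  have hitemsne : (PySem.Dict.counter xs).items ≠ [] := by
    rw [hitems]; simpa using hsetne
  obtain ⟨m, t, hsorted⟩ :
      ∃ m t, PySem.List.sorted (PySem.Dict.counter xs).items (fun p => p.2) true = m :: t := by
    cases hs : PySem.List.sorted (PySem.Dict.counter xs).items (fun p => p.2) true with
    | nil => exact absurd ((PySem.List.sorted_eq_nil_iff _ _ _).1 hs) hitemsne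
    | cons m t => exact ⟨m, t, rfl⟩
  have hcons : pvConsChar xs = m.1 := by
    unfold pvConsChar; rw [hsorted]; rfl
  have hub : ∀ y ∈ (PySem.Dict.counter xs).items, y.2 ≤ m.2 :=
    PySem.List.key_head_sorted_rev_ge _ _ hsorted
  have hmmem : m ∈ (PySem.Dict.counter xs).items := by
    have := (PySem.List.sorted_perm (PySem.Dict.counter xs).items (fun p => p.2) true).mem_iff
      (a := m)
    rw [hsorted] at this
    exact this.1 List.mem_cons_self
  have hm2 : m.2 = (xs.count m.1 : Int) := by
    rw [hitems] at hmmem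
    obtain ⟨c, _, hc⟩ := List.mem_map.1 hmmem
    rw [← hc]
  have hvals : (PySem.Dict.counter xs).values = ((PySem.Dict.counter xs).items).map (·.2) := rfl
  have hvalsne : (PySem.Dict.counter xs).values ≠ [] := by
    rw [hvals]; simpa using hitemsne
  obtain ⟨v, hv⟩ : ∃ v, PySem.List.max? (PySem.Dict.counter xs).values (fun x => x) = some v := by
    cases hmax : PySem.List.max? (PySem.Dict.counter xs).values (fun x => x) with
    | none => exact absurd ((PySem.List.max?_eq_none_iff _ _).1 hmax) hvalsne
    | some v => exact ⟨v, rfl⟩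
  have hvmem : v ∈ (PySem.Dict.counter xs).values := PySem.List.max?_mem hv
  have hvle : v ≤ m.2 := by
    rw [hvals] at hvmem
    obtain ⟨p, hp, hpv⟩ := List.mem_map.1 hvmem
    rw [← hpv]; exact hub p hp
  have hle : m.2 ≤ v := by
    have : m.2 ∈ (PySem.Dict.counter xs).values := by
      rw [hvals]; exact List.mem_map.2 ⟨m, hmmem, rfl⟩
    simpa using PySem.List.max?_isMax hv _ this
  rw [hv, hcons]
  simp only [Option.getD_some]
  omega

-- the inner comprehension of A reads exactly column `elem`
theorem pv_colA (ms : List String) (elem : Int) :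
    (PySem.List.pyRange 0 (ms.length : Int)).map
        (fun el => pvCharAt (PySem.List.pyGetD ms el "") elem)
      = pvCol ms elem := by
  have h := PySem.List.map_pyGetD_pyRange_zero ms ""
  rw [PySem.List.len_eq] at h
  calc (PySem.List.pyRange 0 (ms.length : Int)).map
        (fun el => pvCharAt (PySem.List.pyGetD ms el "") elem)
      = ((PySem.List.pyRange 0 (ms.length : Int)).map
          (fun el => PySem.List.pyGetD ms el "")).map (fun s => pvCharAt s elem) := by
        rw [List.map_map]; rfl
    _ = pvCol ms elem := by rw [h]; rfl

theorem pv_B_eq (ms : List String) (h0 : ms ≠ []) :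
    def_score_alt ms
      = ((List.range (PySem.Str.len (PySem.List.pyGetD ms 0 "")).toNat).map
          (fun (j : Nat) => (ms.length : Int)
            - ((pvCol ms (j : Int)).count (pvConsChar (pvCol ms (j : Int))) : Int))).sum := by
  unfold def_score_alt
  have hk : PySem.Str.len (PySem.List.pyGetD ms 0 "")
      = ((PySem.Str.len (PySem.List.pyGetD ms 0 "")).toNat : Int) := by
    rw [PySem.Str.len_eq]; simp
  rw [hk, PySem.List.pyRange_zero_natCast, List.foldl_map]
  rw [PySem.List.foldl_congr_mem _ _
    (fun (score : Int) (j : Nat) => score + ((ms.length : Int)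
      - ((pvCol ms (j : Int)).count (pvConsChar (pvCol ms (j : Int))) : Int))) 0 ?_]
  · rw [PySem.List.foldl_add]
    simp only [zero_add, PySem.Str.len_eq, Int.toNat_natCast]
  · intro score j _
    have hcounts : ms.foldl
        (fun d row => d.insert (pvCharAt row (j : Int)) (d.getD (pvCharAt row (j : Int)) 0 + 1))
        PySem.Dict.empty
        = PySem.Dict.counter (pvCol ms (j : Int)) := by
      rw [← PySem.Dict.foldl_insert_getD_add_one_eq_counter]
      unfold pvCol
      rw [List.foldl_map]
    simp only [hcounts]
    have hcolne : pvCol ms (j : Int) ≠ [] := by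
      unfold pvCol; simpa using h0
    rw [pv_maxVal _ hcolne]

theorem pv_foldl_ite {α : Type} (l : List α) (P : α → Prop) [DecidablePred P] (a : Int) :
    l.foldl (fun acc x => if P x then acc + 1 else acc) a
      = a + (l.map (fun x => if P x then (1:Int) else 0)).sum := by
  induction l generalizing a with
  | nil => simp
  | cons x t ih =>
      simp only [List.foldl_cons, List.map_cons, List.sum_cons, ih]
      split <;> ring

theorem pv_A_eq (ms : List String) :
    def_score ms
      = ((List.range (PySem.Str.len (PySem.List.pyGetD ms 0 "")).toNat).map
          (fun (j : Nat) => (ms.length : Int)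
            - ((pvCol ms (j : Int)).count (pvConsChar (pvCol ms (j : Int))) : Int))).sum := by
  unfold def_score
  dsimp only
  have hk : PySem.Str.len (PySem.List.pyGetD ms 0 "")
      = ((PySem.Str.len (PySem.List.pyGetD ms 0 "")).toNat : Int) := by
    rw [PySem.Str.len_eq]; simp
  simp only [pv_colA]
  rw [show (fun elem => ((PySem.List.sorted (PySem.Dict.counter (pvCol ms elem)).items
        (fun p => p.2) true).headD (' ', 0)).1)
      = fun elem => pvConsChar (pvCol ms elem) from rfl]
  rw [hk, PySem.List.pyRange_zero_natCast, PySem.List.pyRange_zero_natCast, List.map_map,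
      List.foldl_map]
  simp only [Int.toNat_natCast, Function.comp_def, List.foldl_map]
  rw [PySem.List.foldl_congr_mem _ _
    (fun (x : Int) (i : Nat) =>
      x + ((List.range (PySem.Str.len (PySem.List.pyGetD ms 0 "")).toNat).map
        (fun (j : Nat) =>
          if pvCharAt (PySem.List.pyGetD ms (i : Int) "") (j : Int)
              ≠ PySem.List.pyGetD
                  (List.map (fun (j' : Nat) => pvConsChar (pvCol ms (j' : Int)))
                    (List.range (PySem.Str.len (PySem.List.pyGetD ms 0 "")).toNat)) (j : Int) ' '
          then (1:Int) else 0)).sum) 0 ?_]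
  · rw [PySem.List.foldl_add, zero_add, pv_sum_swap]
    apply congrArg List.sum
    apply List.map_congr_left
    intro j hj
    have hjlt : j < (PySem.Str.len (PySem.List.pyGetD ms 0 "")).toNat := List.mem_range.1 hj
    have hc : PySem.List.pyGetD
        (List.map (fun (j' : Nat) => pvConsChar (pvCol ms (j' : Int)))
          (List.range (PySem.Str.len (PySem.List.pyGetD ms 0 "")).toNat)) (j : Int) ' '
        = pvConsChar (pvCol ms (j : Int)) := by
      rw [PySem.List.pyGetD_natCast]
      exact PySem.List.getD_map_range _ _ _ _ hjlt
    simp only [hc, PySem.List.pyGetD_natCast]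
    have hmap : (List.range ms.length).map
        (fun i => if pvCharAt (ms.getD i "") (j : Int) ≠ pvConsChar (pvCol ms (j : Int))
                  then (1:Int) else 0)
        = (pvCol ms (j : Int)).map
            (fun x => if x ≠ pvConsChar (pvCol ms (j : Int)) then (1:Int) else 0) := by
      rw [show (fun i => if pvCharAt (ms.getD i "") (j : Int) ≠ pvConsChar (pvCol ms (j : Int))
                then (1:Int) else 0)
          = (fun x => if x ≠ pvConsChar (pvCol ms (j : Int)) then (1:Int) else 0)
            ∘ ((fun s => pvCharAt s (j : Int)) ∘ (fun i => ms.getD i "")) from rfl,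
        ← List.map_map, ← List.map_map, pv_range_getD]
      rfl
    rw [hmap, pv_mismatch_sum]
    simp [pvCol]
  · intro x i _
    exact pv_foldl_ite _ _ x
-- ===== VERDICT (by name: the statement is the Claim_ definition above) =====
theorem def_score_spec : Claim_equal_def_score := by
  intro ms _ hpre
  unfold Spec_def_score
  rw [pv_A_eq ms, pv_B_eq ms hpre.1]
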